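-- pv_equiv track=rewrite | github.com/DiegoOrtizRuiz/MOS | Laboratorio 2/problema_1.py | preprocess_security
-- ===== SOURCE A (Python) =====
-- def preprocess_security(sec_list, planes, resources):
--     allowed = {}
--     for r in resources:
--         for p in planes:
--             allowed[(r, p)] = True
--     for r, p, flag in sec_list:
--         if (r, p) in allowed:
--             allowed[(r, p)] = flag
--     return allowed
-- ===== SOURCE B (Python) =====
-- def preprocess_security(sec_list, planes, resources):
--     def last_flag(r, p):
--         flag = True
--         for rr, pp, f in sec_list:
--             if rr == r and pp == p:
--                 flag = f
--         return flag
--     return {(r, p): last_flag(r, p) for r in resources for p in planes}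
-- ===== Notes on version B (the rewrite author's own statement) =====
-- stated objective: alternative
-- what changed: The dict machinery of A (write-True grid then membership-tested patch pass) is eliminated: B computes each grid entry directly by a per-key last-match scan of sec_list, building the result in one comprehension with no auxiliary dict and no mutation pass.
import Mathlib
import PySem

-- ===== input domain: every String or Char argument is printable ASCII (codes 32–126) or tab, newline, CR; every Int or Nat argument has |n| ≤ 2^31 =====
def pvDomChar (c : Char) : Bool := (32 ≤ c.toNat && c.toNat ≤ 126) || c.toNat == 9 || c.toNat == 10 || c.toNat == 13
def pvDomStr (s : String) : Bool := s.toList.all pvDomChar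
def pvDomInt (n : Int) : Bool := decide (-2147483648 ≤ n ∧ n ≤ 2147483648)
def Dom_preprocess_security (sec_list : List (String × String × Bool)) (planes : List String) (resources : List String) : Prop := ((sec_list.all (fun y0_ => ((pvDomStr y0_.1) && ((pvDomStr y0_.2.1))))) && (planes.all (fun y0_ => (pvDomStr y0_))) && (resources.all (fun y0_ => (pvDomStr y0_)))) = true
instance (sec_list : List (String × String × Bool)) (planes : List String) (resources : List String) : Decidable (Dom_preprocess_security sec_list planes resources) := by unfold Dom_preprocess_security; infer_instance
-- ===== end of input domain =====

-- B drops A's dict machinery (write-True grid + membership-tested patch pass): each grid entry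
-- is computed directly by a per-key last-match scan of sec_list (objective: alternative).

-- ===== PORT A =====
def preprocess_security (sec_list : List (String × String × Bool)) (planes : List String) (resources : List String) : List (String × String × Bool) :=
  let allowed : PySem.Dict (String × String) Bool :=
    resources.foldl (fun d r => planes.foldl (fun d p => d.insert (r, p) true) d) PySem.Dict.empty
  let allowed2 : PySem.Dict (String × String) Bool :=
    sec_list.foldl (fun d x => if d.contains (x.1, x.2.1) then d.insert (x.1, x.2.1) x.2.2 else d) allowed
  allowed2.items.map (fun kv => (kv.1.1, kv.1.2, kv.2))

-- ===== PORT B =====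
-- Source B's helper last_flag: scan sec_list keeping the last flag matching (r, p), default True
def pvLastFlag (sec_list : List (String × String × Bool)) (r p : String) : Bool :=
  sec_list.foldl (fun flag x => if x.1 = r ∧ x.2.1 = p then x.2.2 else flag) true

def preprocess_security_alt (sec_list : List (String × String × Bool)) (planes : List String) (resources : List String) : List (String × String × Bool) :=
  let result : PySem.Dict (String × String) Bool :=
    resources.foldl (fun d r => planes.foldl (fun d p => d.insert (r, p) (pvLastFlag sec_list r p)) d) PySem.Dict.empty
  result.items.map (fun kv => (kv.1.1, kv.1.2, kv.2))

-- ===== PRECONDITION & SPEC =====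
def Spec_preprocess_security (sec_list : List (String × String × Bool)) (planes : List String) (resources : List String) (out : List (String × String × Bool)) : Prop := out = preprocess_security_alt sec_list planes resources
instance (sec_list : List (String × String × Bool)) (planes : List String) (resources : List String) (out : List (String × String × Bool)) : Decidable (Spec_preprocess_security sec_list planes resources out) := by unfold Spec_preprocess_security; infer_instance

-- ===== CLAIM (what is proved, stated in full; the proofs are below) =====
def Claim_equal_preprocess_security : Prop := ∀ (sec_list : List (String × String × Bool)) (planes : List String) (resources : List String), Dom_preprocess_security sec_list planes resources → Spec_preprocess_security sec_list planes resources (preprocess_security sec_list planes resources)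

-- ===== LEMMAS AND PROOFS =====

-- the last override in sec_list for key k (Python's "last duplicate wins")
def lastOv : List (String × String × Bool) → (String × String) → Option Bool
  | [], _ => none
  | x :: xs, k =>
    match lastOv xs k with
    | some f => some f
    | none => if (x.1, x.2.1) = k then some x.2.2 else none

-- B's per-key scan computes the last override (or the default)
theorem lastFlag_eq_lastOv (sl : List (String × String × Bool)) (r p : String) (a : Bool) :
    sl.foldl (fun flag x => if x.1 = r ∧ x.2.1 = p then x.2.2 else flag) a
      = (lastOv sl (r, p)).getD a := by
  induction sl generalizing a with
  | nil => simp [lastOv]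
  | cons x xs ih =>
    simp only [List.foldl_cons, ih, lastOv]
    cases h : lastOv xs (r, p) with
    | some f => simp
    | none =>
      by_cases hk : (x.1, x.2.1) = (r, p)
      · have h1 : x.1 = r := congrArg Prod.fst hk
        have h2 : x.2.1 = p := congrArg Prod.snd hk
        simp [h1, h2]
      · have : ¬ (x.1 = r ∧ x.2.1 = p) := by
          intro ⟨h1, h2⟩; exact hk (by rw [h1, h2])
        simp [hk, this]

-- A's patch phase preserves the key list
theorem keys_phase2 (L : List (String × String × Bool)) (d : PySem.Dict (String × String) Bool) :
    (L.foldl (fun d x => if d.contains (x.1, x.2.1) then d.insert (x.1, x.2.1) x.2.2 else d) d).keys = d.keys := by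
  induction L generalizing d with
  | nil => rfl
  | cons x xs ih =>
    simp only [List.foldl_cons]
    rw [ih]
    by_cases h : d.contains (x.1, x.2.1) = true
    · simp [h, PySem.Dict.keys_insert_of_contains _ _ h]
    · simp [h]

-- A's patch phase sets each existing key to its last override
theorem get?_phase2 (L : List (String × String × Bool)) (d : PySem.Dict (String × String) Bool) (k : String × String) :
    (L.foldl (fun d x => if d.contains (x.1, x.2.1) then d.insert (x.1, x.2.1) x.2.2 else d) d).get? k
      = match d.get? k with | none => none | some v => some ((lastOv L k).getD v) := by
  induction L generalizing d with
  | nil => cases h : d.get? k <;> simp [lastOv, h]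
  | cons x xs ih =>
    simp only [List.foldl_cons, ih, lastOv]
    by_cases hc : d.contains (x.1, x.2.1) = true
    · simp only [hc, if_true]
      by_cases hk : k = (x.1, x.2.1)
      · subst hk
        cases hdv : d.get? (x.1, x.2.1) with
        | none =>
          rw [PySem.Dict.contains_eq_isSome_get?, hdv] at hc
          simp at hc
        | some v =>
          simp only [PySem.Dict.get?_insert, hdv]
          cases lastOv xs (x.1, x.2.1) <;> simp
      · rw [PySem.Dict.get?_insert]
        simp only [if_neg hk]
        cases lastOv xs k with
        | some f => simp
        | none => simp [Ne.symm hk]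
    · simp only [if_neg hc]
      cases lastOv xs k with
      | some f => simp
      | none =>
        by_cases hk : (x.1, x.2.1) = k
        · subst hk
          have hdv : d.get? (x.1, x.2.1) = none := by
            rw [PySem.Dict.contains_eq_isSome_get?] at hc
            cases hdv : d.get? (x.1, x.2.1) with
            | none => rfl
            | some v => rw [hdv] at hc; simp at hc
          simp [hdv]
        · simp [hk]

-- inserting values that depend only on the key: pointwise description of the inner fold
theorem get?_inner (g : String × String → Bool) (r : String) (planes : List String)
    (d : PySem.Dict (String × String) Bool) (k : String × String) :
    (planes.foldl (fun d p => d.insert (r, p) (g (r, p))) d).get? k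
      = if k ∈ planes.map (fun p => (r, p)) then some (g k) else d.get? k := by
  induction planes generalizing d with
  | nil => simp
  | cons p ps ih =>
    simp only [List.foldl_cons, ih, List.map_cons, List.mem_cons]
    by_cases hm : k ∈ ps.map (fun p => (r, p))
    · simp [hm]
    · by_cases hk : k = (r, p)
      · subst hk; simp [hm]
      · simp [hm, hk, PySem.Dict.get?_insert]

-- and of the whole grid fold
theorem get?_grid (g : String × String → Bool) (resources planes : List String)
    (d : PySem.Dict (String × String) Bool) (k : String × String) :
    (resources.foldl (fun d r => planes.foldl (fun d p => d.insert (r, p) (g (r, p))) d) d).get? k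
      = if k ∈ resources.flatMap (fun r => planes.map (fun p => (r, p))) then some (g k) else d.get? k := by
  induction resources generalizing d with
  | nil => simp
  | cons r rs ih =>
    simp only [List.foldl_cons, ih, List.flatMap_cons, List.mem_append]
    by_cases hm : k ∈ rs.flatMap (fun r => planes.map (fun p => (r, p)))
    · simp [hm]
    · simp [hm, get?_inner g r planes d k]

-- the key list of a grid fold does not depend on the inserted values
theorem keys_grid (g₁ g₂ : String × String → Bool) (resources planes : List String)
    (d₁ d₂ : PySem.Dict (String × String) Bool) (h : d₁.keys = d₂.keys) :
    (resources.foldl (fun d r => planes.foldl (fun d p => d.insert (r, p) (g₁ (r, p))) d) d₁).keys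
      = (resources.foldl (fun d r => planes.foldl (fun d p => d.insert (r, p) (g₂ (r, p))) d) d₂).keys := by
  induction resources generalizing d₁ d₂ with
  | nil => simpa using h
  | cons r rs ih =>
    simp only [List.foldl_cons]
    apply ih
    rw [PySem.Dict.keys_foldl_insert_key, PySem.Dict.keys_foldl_insert_key, h]

-- the key list of a grid fold stays duplicate-free
theorem nodup_grid (g : String × String → Bool) (resources planes : List String)
    (d : PySem.Dict (String × String) Bool) (h : d.keys.Nodup) :
    (resources.foldl (fun d r => planes.foldl (fun d p => d.insert (r, p) (g (r, p))) d) d).keys.Nodup := by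
  induction resources generalizing d with
  | nil => simpa using h
  | cons r rs ih =>
    simp only [List.foldl_cons]
    exact ih _ (PySem.Dict.nodup_keys_foldl_insert_key _ _ _ _ h)

-- the two constructions produce identical item lists
theorem items_eq (sl : List (String × String × Bool)) (ps rs : List String) :
    (sl.foldl (fun d x => if d.contains (x.1, x.2.1) then d.insert (x.1, x.2.1) x.2.2 else d)
        (rs.foldl (fun d r => ps.foldl (fun d p => d.insert (r, p) true) d) PySem.Dict.empty)).items
      = (rs.foldl (fun d r => ps.foldl (fun d p => d.insert (r, p) (pvLastFlag sl r p)) d)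
          PySem.Dict.empty).items := by
  set aG := rs.foldl (fun d r => ps.foldl (fun d p => d.insert (r, p) true) d) (PySem.Dict.empty : PySem.Dict (String × String) Bool) with haGdef
  set bG := rs.foldl (fun d r => ps.foldl (fun d p => d.insert (r, p) (pvLastFlag sl r p)) d) (PySem.Dict.empty : PySem.Dict (String × String) Bool) with hbGdef
  set aF := sl.foldl (fun d x => if d.contains (x.1, x.2.1) then d.insert (x.1, x.2.1) x.2.2 else d) aG with haFdef
  have hA : ∀ k, aG.get? k = if k ∈ rs.flatMap (fun r => ps.map (fun p => (r, p))) then some true else none :=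
    fun k => get?_grid (fun _ => true) rs ps PySem.Dict.empty k
  have hB : ∀ k, bG.get? k = if k ∈ rs.flatMap (fun r => ps.map (fun p => (r, p))) then some (pvLastFlag sl k.1 k.2) else none :=
    fun k => get?_grid (fun k => pvLastFlag sl k.1 k.2) rs ps PySem.Dict.empty k
  have nodA : aG.keys.Nodup := nodup_grid (fun _ => true) rs ps PySem.Dict.empty (by simp)
  have nodB : bG.keys.Nodup := nodup_grid (fun k => pvLastFlag sl k.1 k.2) rs ps PySem.Dict.empty (by simp)
  have keysEq : aG.keys = bG.keys := keys_grid (fun _ => true) (fun k => pvLastFlag sl k.1 k.2) rs ps _ _ rfl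
  have nodAF : aF.keys.Nodup := by rw [haFdef, keys_phase2]; exact nodA
  have keysAF : aF.keys = bG.keys := by rw [haFdef, keys_phase2]; exact keysEq
  have hget : ∀ k, aF.get? k = bG.get? k := by
    intro k
    rw [haFdef, get?_phase2, hA k, hB k]
    by_cases hm : k ∈ rs.flatMap (fun r => ps.map (fun p => (r, p)))
    · simp only [hm, if_pos]
      have : pvLastFlag sl k.1 k.2 = (lastOv sl k).getD true := by
        rw [pvLastFlag, lastFlag_eq_lastOv]
      rw [this]
    · simp [hm]
  rw [PySem.Dict.items_eq_map_keys aF nodAF true, PySem.Dict.items_eq_map_keys bG nodB true, keysAF]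
  have hfun : (fun k => (k, aF.getD k true)) = (fun k => (k, bG.getD k true)) := by
    funext k
    rw [PySem.Dict.getD_eq_get?_getD, PySem.Dict.getD_eq_get?_getD, hget k]
  rw [hfun]

-- ===== VERDICT (by name: the statement is the Claim_ definition above) =====
theorem preprocess_security_spec : Claim_equal_preprocess_security := by
  intro sl ps rs _
  unfold Spec_preprocess_security preprocess_security preprocess_security_alt
  simp only []
  rw [items_eq]
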